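-- pv_equiv track=rewrite | github.com/HadleyLab/mcode_translator | src/optimization/report_generator.py | _get_model_reliability
-- ===== SOURCE A (Python) =====
-- def _get_model_reliability(model: str, inter_rater_content: str) -> str:
--     """Get reliability rating for a specific model."""
--     if not inter_rater_content:
--         return "Unknown"
--
--     # Look for model in rater performance section
--     lines = inter_rater_content.split("\n")
--     in_rater_section = False
--
--     for line in lines:
--         if "### Rater Performance" in line:
--             in_rater_section = True
--             continue
--         elif in_rater_section and line.startswith("##"):
--             break
--
--         if in_rater_section and model.lower() in line.lower():
--             # Extract success rate
--             if "%" in line: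
--                 try:
--                     pct = line.split("%")[0].split()[-1]
--                     if pct.replace(".", "").isdigit():
--                         return f"{pct}%"
--                 except:
--                     pass
--
--     return "Unknown"
-- ===== SOURCE B (Python) =====
-- def _get_model_reliability(model: str, inter_rater_content: str) -> str:
--     """Backward fold: traverse the lines right-to-left maintaining the pair of
--     outcomes (answer if the scan were already inside the rater section, answer
--     if it were not yet), so no section flag, no break and no early return."""
--     HEADER = "### Rater Performance"
--     needle = model.lower()
--     inside = outside = "Unknown"
--     for line in reversed(inter_rater_content.split("\n")):
--         if HEADER in line:
--             outside = inside          # a header line switches the scan into the section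
--         elif line.startswith("##"):
--             inside = "Unknown"        # a breaker discards everything to its right
--         elif needle in line.lower() and "%" in line:
--             toks = line.split("%")[0].split()
--             if toks and toks[-1].replace(".", "").isdigit():
--                 inside = toks[-1] + "%"
--     return outside
-- ===== Notes on version B (the rewrite author's own statement) =====
-- stated objective: alternative
-- what changed: B replaces A's forward scan with a section flag, break and early return by a single backward fold over the reversed lines that maintains the pair of outcomes (answer if already inside the rater section, answer if not yet): a header line copies inside to outside, a '##' breaker resets inside, a qualifying percentage line overwrites inside; the pair makes the flag, the break and the early return unnecessary.
import Mathlib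
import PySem

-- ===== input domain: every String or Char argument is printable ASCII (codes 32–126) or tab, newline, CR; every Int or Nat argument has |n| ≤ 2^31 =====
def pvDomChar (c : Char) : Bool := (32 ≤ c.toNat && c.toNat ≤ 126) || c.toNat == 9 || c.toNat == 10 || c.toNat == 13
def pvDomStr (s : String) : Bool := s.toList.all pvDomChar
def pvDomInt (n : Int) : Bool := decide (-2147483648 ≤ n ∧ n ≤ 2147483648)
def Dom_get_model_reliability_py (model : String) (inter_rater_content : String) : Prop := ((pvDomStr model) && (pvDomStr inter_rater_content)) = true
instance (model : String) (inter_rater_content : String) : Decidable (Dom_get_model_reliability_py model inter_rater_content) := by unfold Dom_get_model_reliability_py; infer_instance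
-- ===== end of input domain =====

-- B replaces A's forward scan with a section flag and early return by a backward fold that
-- maintains the pair (answer if already inside the section, answer if not yet) — alternative, not faster.

-- ===== PORT A =====
-- A's single for-loop over all lines, threading the in_rater_section flag.
def pyALoop (model : String) : Bool → List String → String
  | _, [] => "Unknown"
  | inSec, line :: rest =>
    if PySem.Str.isIn "### Rater Performance" line then
      pyALoop model true rest                                   -- sets flag, continue
    else if inSec && PySem.Str.startswith line "##" then
      "Unknown"                                                 -- break
    else if inSec && PySem.Str.isIn (PySem.Str.lower model) (PySem.Str.lower line) then
      if PySem.Str.isIn "%" line then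
        -- pct = line.split("%")[0].split()[-1]; the [-1] IndexError is caught by the bare
        -- except and falls through ('none' branch). split("%") is never empty, so headD "" is [0].
        match (PySem.Str.split₀ (((PySem.Str.split? line "%").getD []).headD "")).getLast? with
        | some pct =>
          if PySem.Str.strIsdigit (PySem.Str.replace pct "." "") then pct ++ "%"
          else pyALoop model inSec rest
        | none => pyALoop model inSec rest
      else pyALoop model inSec rest
    else pyALoop model inSec rest

def get_model_reliability_py (model : String) (inter_rater_content : String) : String :=
  if inter_rater_content = "" then "Unknown"
  else pyALoop model false ((PySem.Str.split? inter_rater_content "\n").getD [])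

-- ===== PORT B =====
-- one step of B's reversed loop: st = (inside, outside)
def altStep (needle : String) (st : String × String) (line : String) : String × String :=
  if PySem.Str.isIn "### Rater Performance" line then
    (st.1, st.1)                                                -- outside = inside
  else if PySem.Str.startswith line "##" then
    ("Unknown", st.2)                                           -- inside = "Unknown"
  else if PySem.Str.isIn needle (PySem.Str.lower line) && PySem.Str.isIn "%" line then
    -- toks = line.split("%")[0].split(); guarded last-token digit test
    match (PySem.Str.split₀ (((PySem.Str.split? line "%").getD []).headD "")).getLast? with
    | some pct =>
      if PySem.Str.strIsdigit (PySem.Str.replace pct "." "") then (pct ++ "%", st.2)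
      else st
    | none => st
  else st

def get_model_reliability_py_alt (model : String) (inter_rater_content : String) : String :=
  ((((PySem.Str.split? inter_rater_content "\n").getD []).reverse).foldl
      (altStep (PySem.Str.lower model)) ("Unknown", "Unknown")).2

-- ===== PRECONDITION & SPEC =====
def Spec_get_model_reliability_py (model : String) (inter_rater_content : String) (out : String) : Prop := out = get_model_reliability_py_alt model inter_rater_content
instance (model : String) (inter_rater_content : String) (out : String) : Decidable (Spec_get_model_reliability_py model inter_rater_content out) := by unfold Spec_get_model_reliability_py; infer_instance

-- ===== CLAIM =====
def Claim_equal_get_model_reliability_py : Prop := ∀ (model : String) (inter_rater_content : String), Dom_get_model_reliability_py model inter_rater_content → Spec_get_model_reliability_py model inter_rater_content (get_model_reliability_py model inter_rater_content)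

-- ===== LEMMAS AND PROOFS =====

-- B's backward fold computes, on every suffix, the pair of A's loop outcomes for flag = true / false.
theorem altFoldr_pair (model : String) (lines : List String) :
    lines.foldr (fun line st => altStep (PySem.Str.lower model) st line) ("Unknown", "Unknown")
      = (pyALoop model true lines, pyALoop model false lines) := by
  induction lines with
  | nil => rfl
  | cons line rest ih =>
    simp only [List.foldr_cons, ih]
    by_cases h1 : PySem.Str.isIn "### Rater Performance" line = true
    · simp only [altStep, pyALoop, h1, if_true]
    · rw [Bool.not_eq_true] at h1
      by_cases h2 : PySem.Str.startswith line "##" = true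
      · simp only [altStep, pyALoop, h1, h2, Bool.true_and, Bool.false_and,
          Bool.false_eq_true, if_true, if_false]
      · rw [Bool.not_eq_true] at h2
        by_cases h3 : PySem.Str.isIn (PySem.Str.lower model) (PySem.Str.lower line) = true
        · by_cases h4 : PySem.Str.isIn "%" line = true
          · simp only [altStep, pyALoop, h1, h2, h3, h4, Bool.true_and, Bool.false_and,
              Bool.and_true, Bool.false_eq_true, if_true, if_false]
            cases hm : (PySem.Str.split₀ (((PySem.Str.split? line "%").getD []).headD "")).getLast? with
            | none => rfl
            | some pct =>
              by_cases h5 : PySem.Str.strIsdigit (PySem.Str.replace pct "." "") = true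
              · simp only [h5, if_true]
              · rw [Bool.not_eq_true] at h5
                simp only [h5, Bool.false_eq_true, if_false]
          · rw [Bool.not_eq_true] at h4
            simp only [altStep, pyALoop, h1, h2, h3, h4, Bool.true_and, Bool.false_and,
              Bool.and_false, Bool.false_eq_true, if_true, if_false]
        · rw [Bool.not_eq_true] at h3
          simp only [altStep, pyALoop, h1, h2, h3, Bool.true_and, Bool.false_and,
            Bool.false_eq_true, if_false]

-- hence B is A's loop started with the flag down
theorem alt_eq_pyALoop_false (model : String) (content : String) :
    get_model_reliability_py_alt model content
      = pyALoop model false ((PySem.Str.split? content "\n").getD []) := by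
  unfold get_model_reliability_py_alt
  rw [List.foldl_reverse, altFoldr_pair]

-- ===== VERDICT =====
theorem get_model_reliability_py_spec : Claim_equal_get_model_reliability_py := by
  intro model inter _
  unfold Spec_get_model_reliability_py get_model_reliability_py
  rw [alt_eq_pyALoop_false]
  by_cases h : inter = ""
  · subst h
    have hsplit : (PySem.Str.split? "" "\n").getD [] = [""] := by decide
    rw [if_pos rfl, hsplit]
    simp [pyALoop]
  · rw [if_neg h]
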